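-- pv_equiv track=rewrite | github.com/manikantaN03/hrms_backend | app/utils/backend_analyzer.py | categorize_model_file
-- ===== SOURCE A (Python) =====
-- def categorize_model_file(filename: str) -> str:
--     """Categorize model file based on filename"""
--     filename_lower = filename.lower()
--
--     if any(keyword in filename_lower for keyword in ['employee', 'onboarding', 'separation']):
--         return "HR & Employee"
--     elif any(keyword in filename_lower for keyword in ['attendance', 'shift', 'work']):
--         return "Attendance & Time"
--     elif any(keyword in filename_lower for keyword in ['payroll', 'salary']):
--         return "Payroll & Compensation"
--     elif any(keyword in filename_lower for keyword in ['tax', 'tds', 'epf', 'esi', 'form16']):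
--         return "Statutory & Tax"
--     elif any(keyword in filename_lower for keyword in ['leave', 'request', 'compoff']):
--         return "Leave & Request"
--     elif any(keyword in filename_lower for keyword in ['business', 'department', 'location']):
--         return "Business & Organization"
--     elif any(keyword in filename_lower for keyword in ['report', 'analytics']):
--         return "Reports & Analytics"
--     else:
--         return "Other Domains"
-- ===== SOURCE B (Python) =====
-- LABELS = [
--     "HR & Employee",
--     "Attendance & Time",
--     "Payroll & Compensation",
--     "Statutory & Tax",
--     "Leave & Request",
--     "Business & Organization",
--     "Reports & Analytics",
-- ]
--
-- KEYWORDS = [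
--     ("employee", 0), ("onboarding", 0), ("separation", 0),
--     ("attendance", 1), ("shift", 1), ("work", 1),
--     ("payroll", 2), ("salary", 2),
--     ("tax", 3), ("tds", 3), ("epf", 3), ("esi", 3), ("form16", 3),
--     ("leave", 4), ("request", 4), ("compoff", 4),
--     ("business", 5), ("department", 5), ("location", 5),
--     ("report", 6), ("analytics", 6),
-- ]
--
--
-- def categorize_model_file(filename: str) -> str:
--     """Categorize model file based on filename.
--
--     Single left-to-right sweep over the text positions (a naive multi-pattern
--     matcher): at each position record the best (lowest) rule index of any
--     keyword starting there; the minimum over all positions gives the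
--     highest-priority domain that occurs anywhere in the name.
--     """
--     s = filename.lower()
--     best = 7
--     for i in range(len(s)):
--         for kw, idx in KEYWORDS:
--             if s.startswith(kw, i):
--                 best = min(best, idx)
--     return LABELS[best] if best < 7 else "Other Domains"
-- ===== Notes on version B (the rewrite author's own statement) =====
-- stated objective: alternative
-- what changed: Replaced the per-category if/elif containment chain with a naive multi-pattern text scan: one sweep over the positions of the lowercased name, checking which keyword starts at each position and keeping the minimum rule index as an accumulator, then indexing a label table.
import Mathlib
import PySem

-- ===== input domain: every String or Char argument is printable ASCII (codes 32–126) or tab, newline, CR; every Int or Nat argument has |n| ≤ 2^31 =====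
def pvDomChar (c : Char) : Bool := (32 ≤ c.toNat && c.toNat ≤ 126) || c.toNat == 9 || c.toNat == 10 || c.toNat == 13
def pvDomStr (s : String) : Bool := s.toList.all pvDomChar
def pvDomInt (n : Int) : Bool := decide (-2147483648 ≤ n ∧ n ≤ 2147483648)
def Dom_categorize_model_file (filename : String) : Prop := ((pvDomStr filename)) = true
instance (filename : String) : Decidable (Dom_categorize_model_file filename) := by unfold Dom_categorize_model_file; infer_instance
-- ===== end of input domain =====

-- B replaces the per-category containment chain with a single position sweep
-- (a naive multi-pattern matcher) keeping the minimum rule index; same cost, no speed claim.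

-- ===== PORT A =====
def categorize_model_file (filename : String) : String :=
  let filename_lower := PySem.Str.lower filename
  if ["employee", "onboarding", "separation"].any (fun k => PySem.Str.isIn k filename_lower) then
    "HR & Employee"
  else if ["attendance", "shift", "work"].any (fun k => PySem.Str.isIn k filename_lower) then
    "Attendance & Time"
  else if ["payroll", "salary"].any (fun k => PySem.Str.isIn k filename_lower) then
    "Payroll & Compensation"
  else if ["tax", "tds", "epf", "esi", "form16"].any (fun k => PySem.Str.isIn k filename_lower) then
    "Statutory & Tax"
  else if ["leave", "request", "compoff"].any (fun k => PySem.Str.isIn k filename_lower) then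
    "Leave & Request"
  else if ["business", "department", "location"].any (fun k => PySem.Str.isIn k filename_lower) then
    "Business & Organization"
  else if ["report", "analytics"].any (fun k => PySem.Str.isIn k filename_lower) then
    "Reports & Analytics"
  else
    "Other Domains"

-- ===== PORT B =====
def pvLabels : List String :=
  ["HR & Employee", "Attendance & Time", "Payroll & Compensation", "Statutory & Tax",
   "Leave & Request", "Business & Organization", "Reports & Analytics"]

def pvKW : List (String × Nat) :=
  [("employee", 0), ("onboarding", 0), ("separation", 0),
   ("attendance", 1), ("shift", 1), ("work", 1),
   ("payroll", 2), ("salary", 2),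
   ("tax", 3), ("tds", 3), ("epf", 3), ("esi", 3), ("form16", 3),
   ("leave", 4), ("request", 4), ("compoff", 4),
   ("business", 5), ("department", 5), ("location", 5),
   ("report", 6), ("analytics", 6)]

-- s.startswith(kw, i) with 0 ≤ i < len(s) is exactly "kw is a prefix of s[i:]":
-- ported as kw.toList.isPrefixOf (s.toList.drop i).
def categorize_model_file_alt (filename : String) : String :=
  let cs := (PySem.Str.lower filename).toList
  let best := (List.range cs.length).foldl
    (fun a i => pvKW.foldl
      (fun a p => if p.1.toList.isPrefixOf (cs.drop i) then min a p.2 else a) a) 7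
  -- LABELS[best] if best < 7 else "Other Domains": best : Nat, exact as getD since 0 ≤ best
  if best < 7 then pvLabels.getD best "Other Domains" else "Other Domains"

-- ===== PRECONDITION & SPEC =====
def Spec_categorize_model_file (filename : String) (out : String) : Prop := out = categorize_model_file_alt filename
instance (filename : String) (out : String) : Decidable (Spec_categorize_model_file filename out) := by unfold Spec_categorize_model_file; infer_instance

-- ===== CLAIM (what is proved, stated in full; the proofs are below) =====
def Claim_equal_categorize_model_file : Prop := ∀ (filename : String), Dom_categorize_model_file filename → Spec_categorize_model_file filename (categorize_model_file filename)

-- ===== LEMMAS AND PROOFS =====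

-- the flattened list of rule indices of every keyword occurrence in cs
def pvHits (cs : List Char) : List Nat :=
  (List.range cs.length).flatMap
    (fun i => (pvKW.filter (fun p => p.1.toList.isPrefixOf (cs.drop i))).map Prod.snd)

theorem pv_foldl_if_min (l : List (String × Nat)) (c : String × Nat → Bool) (a : Nat) :
    l.foldl (fun a p => if c p then min a p.2 else a) a
      = ((l.filter c).map Prod.snd).foldl min a := by
  induction l generalizing a with
  | nil => rfl
  | cons x xs ih =>
    by_cases h : c x = true <;> simp [List.filter, h, ih]

theorem pv_foldl_flat (g : Nat → List Nat) (l : List Nat) (a : Nat) :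
    l.foldl (fun a i => (g i).foldl min a) a = (l.flatMap g).foldl min a := by
  induction l generalizing a with
  | nil => rfl
  | cons x xs ih => simp [List.flatMap_cons, List.foldl_append, ih]

theorem pv_best_eq_hits (cs : List Char) :
    (List.range cs.length).foldl
      (fun a i => pvKW.foldl
        (fun a p => if p.1.toList.isPrefixOf (cs.drop i) then min a p.2 else a) a) 7
      = (pvHits cs).foldl min 7 := by
  rw [show (fun (a : Nat) (i : Nat) => pvKW.foldl
        (fun a p => if p.1.toList.isPrefixOf (cs.drop i) then min a p.2 else a) a)
      = fun a i => ((pvKW.filter (fun p => p.1.toList.isPrefixOf (cs.drop i))).map Prod.snd).foldl min a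
      from funext fun a => funext fun i => pv_foldl_if_min _ _ _]
  exact pv_foldl_flat _ _ 7

theorem pv_foldl_min_le_init (l : List Nat) (a : Nat) : l.foldl min a ≤ a := by
  induction l generalizing a with
  | nil => exact le_refl a
  | cons x xs ih => exact le_trans (ih _) (min_le_left a x)

theorem pv_foldl_min_le_mem (l : List Nat) (x : Nat) : ∀ (a : Nat), x ∈ l → l.foldl min a ≤ x := by
  induction l with
  | nil => intro a h; cases h
  | cons y ys ih =>
    intro a h
    rcases List.mem_cons.mp h with rfl | h
    · exact le_trans (pv_foldl_min_le_init ys _) (min_le_right a x)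
    · exact ih _ h

theorem pv_foldl_min_cases (l : List Nat) (a : Nat) : l.foldl min a = a ∨ l.foldl min a ∈ l := by
  induction l generalizing a with
  | nil => exact Or.inl rfl
  | cons y ys ih =>
    rcases ih (min a y) with h | h
    · rcases Nat.le_total a y with hy | hy
      · exact Or.inl (by simpa [min_eq_left hy] using h)
      · right
        rw [List.foldl_cons, h, min_eq_right hy]
        exact List.mem_cons_self
    · exact Or.inr (List.mem_cons_of_mem _ h)

-- a nonempty keyword occurs somewhere iff it occurs starting at a position < length
theorem pv_occ_iff (kw cs : List Char) (hk : kw ≠ []) :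
    (∃ i, i < cs.length ∧ kw.isPrefixOf (cs.drop i) = true) ↔ PySem.Chars.isIn kw cs = true := by
  rw [← PySem.Chars.exists_prefix_drop_iff_isIn]
  constructor
  · rintro ⟨i, _, h⟩; exact ⟨i, List.isPrefixOf_iff_prefix.mp h⟩
  · rintro ⟨j, h⟩
    by_cases hj : j < cs.length
    · exact ⟨j, hj, List.isPrefixOf_iff_prefix.mpr h⟩
    · exfalso
      have hnil : cs.drop j = [] := List.drop_eq_nil_of_le (le_of_not_gt hj)
      rw [hnil] at h
      exact hk (List.prefix_nil.mp h)

set_option maxHeartbeats 1000000 in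
-- membership in pvHits, grouped per rule index
theorem pv_hits_char (cs : List Char) (x : Nat) :
    x ∈ pvHits cs ↔
      ((x = 0 ∧ (PySem.Chars.isIn "employee".toList cs = true ∨ PySem.Chars.isIn "onboarding".toList cs = true ∨ PySem.Chars.isIn "separation".toList cs = true)) ∨
       (x = 1 ∧ (PySem.Chars.isIn "attendance".toList cs = true ∨ PySem.Chars.isIn "shift".toList cs = true ∨ PySem.Chars.isIn "work".toList cs = true)) ∨
       (x = 2 ∧ (PySem.Chars.isIn "payroll".toList cs = true ∨ PySem.Chars.isIn "salary".toList cs = true)) ∨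
       (x = 3 ∧ (PySem.Chars.isIn "tax".toList cs = true ∨ PySem.Chars.isIn "tds".toList cs = true ∨ PySem.Chars.isIn "epf".toList cs = true ∨ PySem.Chars.isIn "esi".toList cs = true ∨ PySem.Chars.isIn "form16".toList cs = true)) ∨
       (x = 4 ∧ (PySem.Chars.isIn "leave".toList cs = true ∨ PySem.Chars.isIn "request".toList cs = true ∨ PySem.Chars.isIn "compoff".toList cs = true)) ∨
       (x = 5 ∧ (PySem.Chars.isIn "business".toList cs = true ∨ PySem.Chars.isIn "department".toList cs = true ∨ PySem.Chars.isIn "location".toList cs = true)) ∨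
       (x = 6 ∧ (PySem.Chars.isIn "report".toList cs = true ∨ PySem.Chars.isIn "analytics".toList cs = true))) := by
  unfold pvHits pvKW
  simp only [List.mem_flatMap, List.mem_range, List.mem_map, List.mem_filter,
    List.mem_cons, List.not_mem_nil, or_false]
  constructor
  · rintro ⟨i, hi, p, ⟨hp, hpref⟩, rfl⟩
    rcases hp with rfl|rfl|rfl|rfl|rfl|rfl|rfl|rfl|rfl|rfl|rfl|rfl|rfl|rfl|rfl|rfl|rfl|rfl|rfl|rfl|rfl
    · have h := (pv_occ_iff "employee".toList cs (by decide)).mp ⟨i, hi, hpref⟩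
      exact Or.inl (⟨rfl, Or.inl h⟩)
    · have h := (pv_occ_iff "onboarding".toList cs (by decide)).mp ⟨i, hi, hpref⟩
      exact Or.inl (⟨rfl, Or.inr (Or.inl h)⟩)
    · have h := (pv_occ_iff "separation".toList cs (by decide)).mp ⟨i, hi, hpref⟩
      exact Or.inl (⟨rfl, Or.inr (Or.inr (h))⟩)
    · have h := (pv_occ_iff "attendance".toList cs (by decide)).mp ⟨i, hi, hpref⟩
      exact Or.inr (Or.inl (⟨rfl, Or.inl h⟩))
    · have h := (pv_occ_iff "shift".toList cs (by decide)).mp ⟨i, hi, hpref⟩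
      exact Or.inr (Or.inl (⟨rfl, Or.inr (Or.inl h)⟩))
    · have h := (pv_occ_iff "work".toList cs (by decide)).mp ⟨i, hi, hpref⟩
      exact Or.inr (Or.inl (⟨rfl, Or.inr (Or.inr (h))⟩))
    · have h := (pv_occ_iff "payroll".toList cs (by decide)).mp ⟨i, hi, hpref⟩
      exact Or.inr (Or.inr (Or.inl (⟨rfl, Or.inl h⟩)))
    · have h := (pv_occ_iff "salary".toList cs (by decide)).mp ⟨i, hi, hpref⟩
      exact Or.inr (Or.inr (Or.inl (⟨rfl, Or.inr (h)⟩)))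
    · have h := (pv_occ_iff "tax".toList cs (by decide)).mp ⟨i, hi, hpref⟩
      exact Or.inr (Or.inr (Or.inr (Or.inl (⟨rfl, Or.inl h⟩))))
    · have h := (pv_occ_iff "tds".toList cs (by decide)).mp ⟨i, hi, hpref⟩
      exact Or.inr (Or.inr (Or.inr (Or.inl (⟨rfl, Or.inr (Or.inl h)⟩))))
    · have h := (pv_occ_iff "epf".toList cs (by decide)).mp ⟨i, hi, hpref⟩
      exact Or.inr (Or.inr (Or.inr (Or.inl (⟨rfl, Or.inr (Or.inr (Or.inl h))⟩))))
    · have h := (pv_occ_iff "esi".toList cs (by decide)).mp ⟨i, hi, hpref⟩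
      exact Or.inr (Or.inr (Or.inr (Or.inl (⟨rfl, Or.inr (Or.inr (Or.inr (Or.inl h)))⟩))))
    · have h := (pv_occ_iff "form16".toList cs (by decide)).mp ⟨i, hi, hpref⟩
      exact Or.inr (Or.inr (Or.inr (Or.inl (⟨rfl, Or.inr (Or.inr (Or.inr (Or.inr (h))))⟩))))
    · have h := (pv_occ_iff "leave".toList cs (by decide)).mp ⟨i, hi, hpref⟩
      exact Or.inr (Or.inr (Or.inr (Or.inr (Or.inl (⟨rfl, Or.inl h⟩)))))
    · have h := (pv_occ_iff "request".toList cs (by decide)).mp ⟨i, hi, hpref⟩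
      exact Or.inr (Or.inr (Or.inr (Or.inr (Or.inl (⟨rfl, Or.inr (Or.inl h)⟩)))))
    · have h := (pv_occ_iff "compoff".toList cs (by decide)).mp ⟨i, hi, hpref⟩
      exact Or.inr (Or.inr (Or.inr (Or.inr (Or.inl (⟨rfl, Or.inr (Or.inr (h))⟩)))))
    · have h := (pv_occ_iff "business".toList cs (by decide)).mp ⟨i, hi, hpref⟩
      exact Or.inr (Or.inr (Or.inr (Or.inr (Or.inr (Or.inl (⟨rfl, Or.inl h⟩))))))
    · have h := (pv_occ_iff "department".toList cs (by decide)).mp ⟨i, hi, hpref⟩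
      exact Or.inr (Or.inr (Or.inr (Or.inr (Or.inr (Or.inl (⟨rfl, Or.inr (Or.inl h)⟩))))))
    · have h := (pv_occ_iff "location".toList cs (by decide)).mp ⟨i, hi, hpref⟩
      exact Or.inr (Or.inr (Or.inr (Or.inr (Or.inr (Or.inl (⟨rfl, Or.inr (Or.inr (h))⟩))))))
    · have h := (pv_occ_iff "report".toList cs (by decide)).mp ⟨i, hi, hpref⟩
      exact Or.inr (Or.inr (Or.inr (Or.inr (Or.inr (Or.inr (⟨rfl, Or.inl h⟩))))))
    · have h := (pv_occ_iff "analytics".toList cs (by decide)).mp ⟨i, hi, hpref⟩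
      exact Or.inr (Or.inr (Or.inr (Or.inr (Or.inr (Or.inr (⟨rfl, Or.inr (h)⟩))))))
  · intro h
    rcases h with ⟨rfl,h|h|h⟩|⟨rfl,h|h|h⟩|⟨rfl,h|h⟩|⟨rfl,h|h|h|h|h⟩|⟨rfl,h|h|h⟩|⟨rfl,h|h|h⟩|⟨rfl,h|h⟩
    · obtain ⟨i, hi, hp⟩ := (pv_occ_iff "employee".toList cs (by decide)).mpr h
      exact ⟨i, hi, ("employee", 0), ⟨Or.inl rfl, hp⟩, rfl⟩
    · obtain ⟨i, hi, hp⟩ := (pv_occ_iff "onboarding".toList cs (by decide)).mpr h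
      exact ⟨i, hi, ("onboarding", 0), ⟨Or.inr (Or.inl rfl), hp⟩, rfl⟩
    · obtain ⟨i, hi, hp⟩ := (pv_occ_iff "separation".toList cs (by decide)).mpr h
      exact ⟨i, hi, ("separation", 0), ⟨Or.inr (Or.inr (Or.inl rfl)), hp⟩, rfl⟩
    · obtain ⟨i, hi, hp⟩ := (pv_occ_iff "attendance".toList cs (by decide)).mpr h
      exact ⟨i, hi, ("attendance", 1), ⟨Or.inr (Or.inr (Or.inr (Or.inl rfl))), hp⟩, rfl⟩
    · obtain ⟨i, hi, hp⟩ := (pv_occ_iff "shift".toList cs (by decide)).mpr h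
      exact ⟨i, hi, ("shift", 1), ⟨Or.inr (Or.inr (Or.inr (Or.inr (Or.inl rfl)))), hp⟩, rfl⟩
    · obtain ⟨i, hi, hp⟩ := (pv_occ_iff "work".toList cs (by decide)).mpr h
      exact ⟨i, hi, ("work", 1), ⟨Or.inr (Or.inr (Or.inr (Or.inr (Or.inr (Or.inl rfl))))), hp⟩, rfl⟩
    · obtain ⟨i, hi, hp⟩ := (pv_occ_iff "payroll".toList cs (by decide)).mpr h
      exact ⟨i, hi, ("payroll", 2), ⟨Or.inr (Or.inr (Or.inr (Or.inr (Or.inr (Or.inr (Or.inl rfl)))))), hp⟩, rfl⟩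
    · obtain ⟨i, hi, hp⟩ := (pv_occ_iff "salary".toList cs (by decide)).mpr h
      exact ⟨i, hi, ("salary", 2), ⟨Or.inr (Or.inr (Or.inr (Or.inr (Or.inr (Or.inr (Or.inr (Or.inl rfl))))))), hp⟩, rfl⟩
    · obtain ⟨i, hi, hp⟩ := (pv_occ_iff "tax".toList cs (by decide)).mpr h
      exact ⟨i, hi, ("tax", 3), ⟨Or.inr (Or.inr (Or.inr (Or.inr (Or.inr (Or.inr (Or.inr (Or.inr (Or.inl rfl)))))))), hp⟩, rfl⟩
    · obtain ⟨i, hi, hp⟩ := (pv_occ_iff "tds".toList cs (by decide)).mpr h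
      exact ⟨i, hi, ("tds", 3), ⟨Or.inr (Or.inr (Or.inr (Or.inr (Or.inr (Or.inr (Or.inr (Or.inr (Or.inr (Or.inl rfl))))))))), hp⟩, rfl⟩
    · obtain ⟨i, hi, hp⟩ := (pv_occ_iff "epf".toList cs (by decide)).mpr h
      exact ⟨i, hi, ("epf", 3), ⟨Or.inr (Or.inr (Or.inr (Or.inr (Or.inr (Or.inr (Or.inr (Or.inr (Or.inr (Or.inr (Or.inl rfl)))))))))), hp⟩, rfl⟩
    · obtain ⟨i, hi, hp⟩ := (pv_occ_iff "esi".toList cs (by decide)).mpr h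
      exact ⟨i, hi, ("esi", 3), ⟨Or.inr (Or.inr (Or.inr (Or.inr (Or.inr (Or.inr (Or.inr (Or.inr (Or.inr (Or.inr (Or.inr (Or.inl rfl))))))))))), hp⟩, rfl⟩
    · obtain ⟨i, hi, hp⟩ := (pv_occ_iff "form16".toList cs (by decide)).mpr h
      exact ⟨i, hi, ("form16", 3), ⟨Or.inr (Or.inr (Or.inr (Or.inr (Or.inr (Or.inr (Or.inr (Or.inr (Or.inr (Or.inr (Or.inr (Or.inr (Or.inl rfl)))))))))))), hp⟩, rfl⟩
    · obtain ⟨i, hi, hp⟩ := (pv_occ_iff "leave".toList cs (by decide)).mpr h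
      exact ⟨i, hi, ("leave", 4), ⟨Or.inr (Or.inr (Or.inr (Or.inr (Or.inr (Or.inr (Or.inr (Or.inr (Or.inr (Or.inr (Or.inr (Or.inr (Or.inr (Or.inl rfl))))))))))))), hp⟩, rfl⟩
    · obtain ⟨i, hi, hp⟩ := (pv_occ_iff "request".toList cs (by decide)).mpr h
      exact ⟨i, hi, ("request", 4), ⟨Or.inr (Or.inr (Or.inr (Or.inr (Or.inr (Or.inr (Or.inr (Or.inr (Or.inr (Or.inr (Or.inr (Or.inr (Or.inr (Or.inr (Or.inl rfl)))))))))))))), hp⟩, rfl⟩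
    · obtain ⟨i, hi, hp⟩ := (pv_occ_iff "compoff".toList cs (by decide)).mpr h
      exact ⟨i, hi, ("compoff", 4), ⟨Or.inr (Or.inr (Or.inr (Or.inr (Or.inr (Or.inr (Or.inr (Or.inr (Or.inr (Or.inr (Or.inr (Or.inr (Or.inr (Or.inr (Or.inr (Or.inl rfl))))))))))))))), hp⟩, rfl⟩
    · obtain ⟨i, hi, hp⟩ := (pv_occ_iff "business".toList cs (by decide)).mpr h
      exact ⟨i, hi, ("business", 5), ⟨Or.inr (Or.inr (Or.inr (Or.inr (Or.inr (Or.inr (Or.inr (Or.inr (Or.inr (Or.inr (Or.inr (Or.inr (Or.inr (Or.inr (Or.inr (Or.inr (Or.inl rfl)))))))))))))))), hp⟩, rfl⟩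
    · obtain ⟨i, hi, hp⟩ := (pv_occ_iff "department".toList cs (by decide)).mpr h
      exact ⟨i, hi, ("department", 5), ⟨Or.inr (Or.inr (Or.inr (Or.inr (Or.inr (Or.inr (Or.inr (Or.inr (Or.inr (Or.inr (Or.inr (Or.inr (Or.inr (Or.inr (Or.inr (Or.inr (Or.inr (Or.inl rfl))))))))))))))))), hp⟩, rfl⟩
    · obtain ⟨i, hi, hp⟩ := (pv_occ_iff "location".toList cs (by decide)).mpr h
      exact ⟨i, hi, ("location", 5), ⟨Or.inr (Or.inr (Or.inr (Or.inr (Or.inr (Or.inr (Or.inr (Or.inr (Or.inr (Or.inr (Or.inr (Or.inr (Or.inr (Or.inr (Or.inr (Or.inr (Or.inr (Or.inr (Or.inl rfl)))))))))))))))))), hp⟩, rfl⟩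
    · obtain ⟨i, hi, hp⟩ := (pv_occ_iff "report".toList cs (by decide)).mpr h
      exact ⟨i, hi, ("report", 6), ⟨Or.inr (Or.inr (Or.inr (Or.inr (Or.inr (Or.inr (Or.inr (Or.inr (Or.inr (Or.inr (Or.inr (Or.inr (Or.inr (Or.inr (Or.inr (Or.inr (Or.inr (Or.inr (Or.inr (Or.inl rfl))))))))))))))))))), hp⟩, rfl⟩
    · obtain ⟨i, hi, hp⟩ := (pv_occ_iff "analytics".toList cs (by decide)).mpr h
      exact ⟨i, hi, ("analytics", 6), ⟨Or.inr (Or.inr (Or.inr (Or.inr (Or.inr (Or.inr (Or.inr (Or.inr (Or.inr (Or.inr (Or.inr (Or.inr (Or.inr (Or.inr (Or.inr (Or.inr (Or.inr (Or.inr (Or.inr (Or.inr (rfl)))))))))))))))))))), hp⟩, rfl⟩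

set_option maxHeartbeats 1000000 in
-- the minimum hit index equals the first-match chain index
theorem pv_fold_eq_chain (cs : List Char) :
    (pvHits cs).foldl min 7 =
      (if PySem.Chars.isIn "employee".toList cs = true ∨ PySem.Chars.isIn "onboarding".toList cs = true ∨ PySem.Chars.isIn "separation".toList cs = true then 0
       else if PySem.Chars.isIn "attendance".toList cs = true ∨ PySem.Chars.isIn "shift".toList cs = true ∨ PySem.Chars.isIn "work".toList cs = true then 1
       else if PySem.Chars.isIn "payroll".toList cs = true ∨ PySem.Chars.isIn "salary".toList cs = true then 2
       else if PySem.Chars.isIn "tax".toList cs = true ∨ PySem.Chars.isIn "tds".toList cs = true ∨ PySem.Chars.isIn "epf".toList cs = true ∨ PySem.Chars.isIn "esi".toList cs = true ∨ PySem.Chars.isIn "form16".toList cs = true then 3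
       else if PySem.Chars.isIn "leave".toList cs = true ∨ PySem.Chars.isIn "request".toList cs = true ∨ PySem.Chars.isIn "compoff".toList cs = true then 4
       else if PySem.Chars.isIn "business".toList cs = true ∨ PySem.Chars.isIn "department".toList cs = true ∨ PySem.Chars.isIn "location".toList cs = true then 5
       else if PySem.Chars.isIn "report".toList cs = true ∨ PySem.Chars.isIn "analytics".toList cs = true then 6
       else 7) := by
  have hcase := pv_foldl_min_cases (pvHits cs) 7
  have hle : ∀ x ∈ pvHits cs, (pvHits cs).foldl min 7 ≤ x :=
    fun x hx => pv_foldl_min_le_mem (pvHits cs) x 7 hx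
  split_ifs with h0 h1 h2 h3 h4 h5 h6
  · have hm : 0 ∈ pvHits cs := (pv_hits_char cs 0).mpr (Or.inl (⟨rfl, h0⟩))
    have hub := hle 0 hm
    rcases hcase with hc | hc
    · omega
    · rcases (pv_hits_char cs _).mp hc with ⟨he,hd⟩|⟨he,hd⟩|⟨he,hd⟩|⟨he,hd⟩|⟨he,hd⟩|⟨he,hd⟩|⟨he,hd⟩
      · exact he
      · omega
      · omega
      · omega
      · omega
      · omega
      · omega
  · have hm : 1 ∈ pvHits cs := (pv_hits_char cs 1).mpr (Or.inr (Or.inl (⟨rfl, h1⟩)))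
    have hub := hle 1 hm
    rcases hcase with hc | hc
    · omega
    · rcases (pv_hits_char cs _).mp hc with ⟨he,hd⟩|⟨he,hd⟩|⟨he,hd⟩|⟨he,hd⟩|⟨he,hd⟩|⟨he,hd⟩|⟨he,hd⟩
      · exact absurd hd h0
      · exact he
      · omega
      · omega
      · omega
      · omega
      · omega
  · have hm : 2 ∈ pvHits cs := (pv_hits_char cs 2).mpr (Or.inr (Or.inr (Or.inl (⟨rfl, h2⟩))))
    have hub := hle 2 hm
    rcases hcase with hc | hc
    · omega
    · rcases (pv_hits_char cs _).mp hc with ⟨he,hd⟩|⟨he,hd⟩|⟨he,hd⟩|⟨he,hd⟩|⟨he,hd⟩|⟨he,hd⟩|⟨he,hd⟩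
      · exact absurd hd h0
      · exact absurd hd h1
      · exact he
      · omega
      · omega
      · omega
      · omega
  · have hm : 3 ∈ pvHits cs := (pv_hits_char cs 3).mpr (Or.inr (Or.inr (Or.inr (Or.inl (⟨rfl, h3⟩)))))
    have hub := hle 3 hm
    rcases hcase with hc | hc
    · omega
    · rcases (pv_hits_char cs _).mp hc with ⟨he,hd⟩|⟨he,hd⟩|⟨he,hd⟩|⟨he,hd⟩|⟨he,hd⟩|⟨he,hd⟩|⟨he,hd⟩
      · exact absurd hd h0
      · exact absurd hd h1
      · exact absurd hd h2
      · exact he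
      · omega
      · omega
      · omega
  · have hm : 4 ∈ pvHits cs := (pv_hits_char cs 4).mpr (Or.inr (Or.inr (Or.inr (Or.inr (Or.inl (⟨rfl, h4⟩))))))
    have hub := hle 4 hm
    rcases hcase with hc | hc
    · omega
    · rcases (pv_hits_char cs _).mp hc with ⟨he,hd⟩|⟨he,hd⟩|⟨he,hd⟩|⟨he,hd⟩|⟨he,hd⟩|⟨he,hd⟩|⟨he,hd⟩
      · exact absurd hd h0
      · exact absurd hd h1
      · exact absurd hd h2
      · exact absurd hd h3
      · exact he
      · omega
      · omega
  · have hm : 5 ∈ pvHits cs := (pv_hits_char cs 5).mpr (Or.inr (Or.inr (Or.inr (Or.inr (Or.inr (Or.inl (⟨rfl, h5⟩)))))))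
    have hub := hle 5 hm
    rcases hcase with hc | hc
    · omega
    · rcases (pv_hits_char cs _).mp hc with ⟨he,hd⟩|⟨he,hd⟩|⟨he,hd⟩|⟨he,hd⟩|⟨he,hd⟩|⟨he,hd⟩|⟨he,hd⟩
      · exact absurd hd h0
      · exact absurd hd h1
      · exact absurd hd h2
      · exact absurd hd h3
      · exact absurd hd h4
      · exact he
      · omega
  · have hm : 6 ∈ pvHits cs := (pv_hits_char cs 6).mpr (Or.inr (Or.inr (Or.inr (Or.inr (Or.inr (Or.inr (⟨rfl, h6⟩)))))))
    have hub := hle 6 hm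
    rcases hcase with hc | hc
    · omega
    · rcases (pv_hits_char cs _).mp hc with ⟨he,hd⟩|⟨he,hd⟩|⟨he,hd⟩|⟨he,hd⟩|⟨he,hd⟩|⟨he,hd⟩|⟨he,hd⟩
      · exact absurd hd h0
      · exact absurd hd h1
      · exact absurd hd h2
      · exact absurd hd h3
      · exact absurd hd h4
      · exact absurd hd h5
      · exact he
  · rcases hcase with hc | hc
    · exact hc
    · rcases (pv_hits_char cs _).mp hc with ⟨he,hd⟩|⟨he,hd⟩|⟨he,hd⟩|⟨he,hd⟩|⟨he,hd⟩|⟨he,hd⟩|⟨he,hd⟩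
      · exact absurd hd h0
      · exact absurd hd h1
      · exact absurd hd h2
      · exact absurd hd h3
      · exact absurd hd h4
      · exact absurd hd h5
      · exact absurd hd h6

-- the label-table lookup of the chain index equals the if/elif chain of labels
theorem pv_if_labels (c0 c1 c2 c3 c4 c5 c6 : Prop)
    [Decidable c0] [Decidable c1] [Decidable c2] [Decidable c3] [Decidable c4] [Decidable c5] [Decidable c6] :
    (if (if c0 then (0:Nat) else if c1 then 1 else if c2 then 2 else if c3 then 3 else if c4 then 4 else if c5 then 5 else if c6 then 6 else 7) < 7 then pvLabels.getD (if c0 then (0:Nat) else if c1 then 1 else if c2 then 2 else if c3 then 3 else if c4 then 4 else if c5 then 5 else if c6 then 6 else 7) "Other Domains" else "Other Domains")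
      = (if c0 then "HR & Employee"
       else if c1 then "Attendance & Time"
       else if c2 then "Payroll & Compensation"
       else if c3 then "Statutory & Tax"
       else if c4 then "Leave & Request"
       else if c5 then "Business & Organization"
       else if c6 then "Reports & Analytics"
       else "Other Domains") := by
  by_cases h0 : c0 <;> by_cases h1 : c1 <;> by_cases h2 : c2 <;> by_cases h3 : c3 <;>
    by_cases h4 : c4 <;> by_cases h5 : c5 <;> by_cases h6 : c6 <;>
    simp [h0, h1, h2, h3, h4, h5, h6, pvLabels]

set_option maxHeartbeats 1000000 in
-- ===== VERDICT (by name: the statement is the Claim_ definition above) =====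
theorem categorize_model_file_spec : Claim_equal_categorize_model_file := by
  intro filename _
  unfold Spec_categorize_model_file categorize_model_file categorize_model_file_alt
  simp only [pv_best_eq_hits, pv_fold_eq_chain, List.any_cons, List.any_nil,
    Bool.or_false, Bool.or_eq_true, PySem.Str.isIn_eq]
  exact (pv_if_labels _ _ _ _ _ _ _).symm
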